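-- pv_equiv track=rewrite | github.com/pypi-data/pypi-mirror-403 | packages/youtube-to-docs/youtube_to_docs-0.0.62.tar.gz/youtube_to_docs-0.0.62/youtube_to_docs/utils.py | add_question_numbers
-- ===== SOURCE A (Python) =====
-- def add_question_numbers(markdown_table: str) -> str:
--     """
--     Adds a 'question number' column to the markdown table.
--     """
--     lines = markdown_table.strip().split("\n")
--     if not lines:
--         return markdown_table
--
--     # Find the header row and separator row
--     header_idx = -1
--     for i in range(len(lines) - 1):
--         line = lines[i].strip()
--         next_line = lines[i + 1].strip()
--         if "|" in line and ("---" in next_line or "-|-" in next_line):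
--             header_idx = i
--             break
--
--     if header_idx == -1:
--         # Fallback: if we can't find a clear table header+separator, return as is
--         return markdown_table
--
--     new_lines = []
--     # Add lines before the table as is
--     for i in range(header_idx):
--         new_lines.append(lines[i])
--
--     # Header row
--     header = lines[header_idx].strip()
--     if not header.startswith("|"):
--         header = "|" + header
--     new_lines.append(f"| question number {header}")
--
--     # Separator row
--     separator = lines[header_idx + 1].strip()
--     if not separator.startswith("|"):
--         separator = "|" + separator
--     new_lines.append(f"|---{separator}")
--
--     # Data rows
--     question_counter = 1
--     for i in range(header_idx + 2, len(lines)):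
--         line = lines[i].strip()
--         if not line:
--             continue
--         if line.startswith("|"):
--             new_lines.append(f"| {question_counter} {line}")
--             question_counter += 1
--         elif "|" in line:
--             new_lines.append(f"| {question_counter} | {line}")
--             question_counter += 1
--         else:
--             new_lines.append(lines[i])
--
--     return "\n".join(new_lines)
-- ===== SOURCE B (Python) =====
-- def add_question_numbers(markdown_table: str) -> str:
--     """
--     Adds a 'question number' column to the markdown table.
--
--     Declarative version: the header/separator pair is located with a
--     comprehension over adjacent line pairs, and each data row's number is
--     derived as a prefix count of pipe-carrying rows before it (no running
--     counter, no sentinel, no index loops); the output is assembled from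
--     slices and comprehensions.
--     """
--     lines = markdown_table.strip().split("\n")
--     hits = [i for i, (a, b) in enumerate(zip(lines, lines[1:]))
--             if "|" in a.strip() and ("---" in b.strip() or "-|-" in b.strip())]
--     if not hits:
--         return markdown_table
--     h = hits[0]
--     header = lines[h].strip()
--     sep = lines[h + 1].strip()
--     tail = lines[h + 2:]
--     stripped = [t.strip() for t in tail]
--
--     def row(j):
--         s = stripped[j]
--         if not s:
--             return None
--         n = 1 + sum(1 for t in stripped[:j] if "|" in t)
--         if s.startswith("|"):
--             return f"| {n} {s}"
--         if "|" in s: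
--             return f"| {n} | {s}"
--         return tail[j]
--
--     body = [r for r in map(row, range(len(tail))) if r is not None]
--     return "\n".join(
--         lines[:h]
--         + ["| question number " + (header if header.startswith("|") else "|" + header)]
--         + ["|---" + (sep if sep.startswith("|") else "|" + sep)]
--         + body
--     )
-- ===== Notes on version B (the rewrite author's own statement) =====
-- stated objective: alternative
-- what changed: Replaces A's imperative three-phase rebuild (sentinel-based header search with break, index loop copying the prefix, and a mutable running counter over the data rows) with a declarative construction: the header/separator pair is located by filtering enumerated adjacent line pairs, each data row's number is derived independently as a prefix count of pipe-carrying rows, and the output is assembled from slices and comprehensions.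
import Mathlib
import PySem

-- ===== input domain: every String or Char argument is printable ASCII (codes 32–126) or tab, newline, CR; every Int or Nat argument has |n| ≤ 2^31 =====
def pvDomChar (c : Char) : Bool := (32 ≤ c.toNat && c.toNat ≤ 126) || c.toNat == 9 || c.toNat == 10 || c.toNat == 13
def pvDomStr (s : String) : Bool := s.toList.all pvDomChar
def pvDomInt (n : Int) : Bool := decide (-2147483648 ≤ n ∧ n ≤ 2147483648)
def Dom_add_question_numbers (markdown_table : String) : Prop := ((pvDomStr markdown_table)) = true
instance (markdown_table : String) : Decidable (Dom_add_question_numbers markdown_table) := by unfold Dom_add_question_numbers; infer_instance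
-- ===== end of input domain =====

-- B replaces A's sentinel search / prefix re-scan / running-counter loop with a declarative
-- build: header pair found by filtering enumerated adjacent pairs, row numbers computed as
-- prefix counts; same results, similar cost (objective: alternative).

-- ===== PORT A =====
-- A's header-search loop with break: recursion over the index list, -1 if the loop falls through.
def aFindA (lines : List String) : List Int → Int
  | [] => -1
  | i :: rest =>
    let line := PySem.Str.strip (PySem.List.pyGetD lines i "")
    let next_line := PySem.Str.strip (PySem.List.pyGetD lines (i + 1) "")
    if PySem.Str.isIn "|" line &&
        (PySem.Str.isIn "---" next_line || PySem.Str.isIn "-|-" next_line) then i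
    else aFindA lines rest

def add_question_numbers (markdown_table : String) : String :=
  let lines := (PySem.Str.split? (PySem.Str.strip markdown_table) "\n").getD []  -- sep ≠ "", never none
  if lines = [] then markdown_table
  else
    let n : Int := PySem.List.len lines
    let header_idx := aFindA lines (PySem.List.pyRange 0 (n - 1) 1)
    if header_idx = -1 then markdown_table
    else
      -- indices 0..header_idx are in range, so pyGetD's default is never used
      let new_lines := (PySem.List.pyRange 0 header_idx 1).foldl
        (fun acc i => acc ++ [PySem.List.pyGetD lines i ""]) []
      let header := PySem.Str.strip (PySem.List.pyGetD lines header_idx "")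
      let header := if PySem.Str.startswith header "|" then header else "|" ++ header
      let new_lines := new_lines ++ ["| question number " ++ header]
      let separator := PySem.Str.strip (PySem.List.pyGetD lines (header_idx + 1) "")
      let separator := if PySem.Str.startswith separator "|" then separator else "|" ++ separator
      let new_lines := new_lines ++ ["|---" ++ separator]
      let res := (PySem.List.pyRange (header_idx + 2) n 1).foldl
        (fun (st : List String × Int) i =>
          let line := PySem.Str.strip (PySem.List.pyGetD lines i "")
          if line = "" then st
          else if PySem.Str.startswith line "|" then
            (st.1 ++ ["| " ++ PySem.Int.toStr st.2 ++ " " ++ line], st.2 + 1)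
          else if PySem.Str.isIn "|" line then
            (st.1 ++ ["| " ++ PySem.Int.toStr st.2 ++ " | " ++ line], st.2 + 1)
          else (st.1 ++ [PySem.List.pyGetD lines i ""], st.2))
        (new_lines, 1)
      PySem.Str.join "\n" res.1

-- ===== PORT B =====
-- the comprehension over enumerate(zip(lines, lines[1:])): indices of header/separator pairs
def bHits (lines : List String) : List Int :=
  ((PySem.List.enumerate (lines.zip (PySem.List.slice lines (some 1) none)) 0).filter
      (fun p => PySem.Str.isIn "|" (PySem.Str.strip p.2.1) &&
        (PySem.Str.isIn "---" (PySem.Str.strip p.2.2) ||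
         PySem.Str.isIn "-|-" (PySem.Str.strip p.2.2)))).map (·.1)

-- row(j): None for a blank line, otherwise the rendered row; the number is a prefix count
def bRow (tail stripped : List String) (j : Int) : Option String :=
  let s := PySem.List.pyGetD stripped j ""
  if s = "" then none
  else
    let n : Int := 1 + ((PySem.List.slice stripped none (some j)).countP
      (fun t => PySem.Str.isIn "|" t) : Nat)
    if PySem.Str.startswith s "|" then some ("| " ++ PySem.Int.toStr n ++ " " ++ s)
    else if PySem.Str.isIn "|" s then some ("| " ++ PySem.Int.toStr n ++ " | " ++ s)
    else some (PySem.List.pyGetD tail j "")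

def add_question_numbers_alt (markdown_table : String) : String :=
  let lines := (PySem.Str.split? (PySem.Str.strip markdown_table) "\n").getD []
  match bHits lines with
  | [] => markdown_table
  | h :: _ =>
    let header := PySem.Str.strip (PySem.List.pyGetD lines h "")
    let sep := PySem.Str.strip (PySem.List.pyGetD lines (h + 1) "")
    let tail := PySem.List.slice lines (some (h + 2)) none
    let stripped := tail.map PySem.Str.strip
    let body := (PySem.List.pyRange 0 (PySem.List.len tail) 1).filterMap (bRow tail stripped)
    PySem.Str.join "\n"
      (PySem.List.slice lines none (some h)
        ++ ["| question number " ++ (if PySem.Str.startswith header "|" then header else "|" ++ header)]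
        ++ ["|---" ++ (if PySem.Str.startswith sep "|" then sep else "|" ++ sep)]
        ++ body)

-- ===== PRECONDITION & SPEC =====
def Spec_add_question_numbers (markdown_table : String) (out : String) : Prop := out = add_question_numbers_alt markdown_table
instance (markdown_table : String) (out : String) : Decidable (Spec_add_question_numbers markdown_table out) := by unfold Spec_add_question_numbers; infer_instance

-- ===== CLAIM (what is proved, stated in full; the proofs are below) =====
def Claim_equal_add_question_numbers : Prop := ∀ (markdown_table : String), Dom_add_question_numbers markdown_table → Spec_add_question_numbers markdown_table (add_question_numbers markdown_table)

-- ===== LEMMAS AND PROOFS =====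
-- the pair predicate both programs apply to a (line, next line) pair
def pvCond (a b : String) : Bool :=
  PySem.Str.isIn "|" (PySem.Str.strip a) &&
  (PySem.Str.isIn "---" (PySem.Str.strip b) || PySem.Str.isIn "-|-" (PySem.Str.strip b))

theorem aFindA_eq_find (lines : List String) (l : List Int) :
    aFindA lines l = ((l.find? (fun i => pvCond (PySem.List.pyGetD lines i "")
      (PySem.List.pyGetD lines (i + 1) ""))).getD (-1)) := by
  induction l with
  | nil => rfl
  | cons i rest ih =>
    by_cases h : pvCond (PySem.List.pyGetD lines i "") (PySem.List.pyGetD lines (i + 1) "") = true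
    · rw [List.find?_cons_of_pos (p := fun i => pvCond (PySem.List.pyGetD lines i "") (PySem.List.pyGetD lines (i + 1) "")) h, Option.getD_some]
      have h' := h; unfold pvCond at h'
      simp only [aFindA, h', if_true]
    · rw [List.find?_cons_of_neg (p := fun i => pvCond (PySem.List.pyGetD lines i "") (PySem.List.pyGetD lines (i + 1) "")) (by simpa using h), ← ih]
      have h' : (PySem.Str.isIn "|" (PySem.Str.strip (PySem.List.pyGetD lines i "")) &&
          (PySem.Str.isIn "---" (PySem.Str.strip (PySem.List.pyGetD lines (i + 1) "")) ||
           PySem.Str.isIn "-|-" (PySem.Str.strip (PySem.List.pyGetD lines (i + 1) "")))) = false := by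
        unfold pvCond at h
        exact Bool.not_eq_true _ ▸ (by simpa using h)
      simp only [aFindA, h', Bool.false_eq_true, if_false]

theorem bHits_eq (lines : List String) :
    bHits lines = (PySem.List.pyRange 0 ((lines.zip lines.tail).length : Int) 1).filter
      (fun i => pvCond (PySem.List.pyGetD lines i "") (PySem.List.pyGetD lines (i + 1) "")) := by
  unfold bHits
  rw [PySem.List.slice_from_one,
    PySem.List.enumerate_eq_map_pyRange (lines.zip lines.tail) ("", ""),
    List.filter_map, List.map_map, PySem.List.len_eq]
  rw [show ((fun (x : Int × String × String) => x.1) ∘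
      (fun j => (j, PySem.List.pyGetD (lines.zip lines.tail) j ("", "")))) = id from rfl,
    List.map_id]
  refine List.filter_congr ?_
  intro i hi
  rw [PySem.List.mem_pyRange_one] at hi
  obtain ⟨h0, hlt⟩ := hi
  obtain ⟨k, rfl⟩ : ∃ k : Nat, i = (k : Int) := ⟨i.toNat, (Int.toNat_of_nonneg h0).symm⟩
  have hk : k < (lines.zip lines.tail).length := by exact_mod_cast hlt
  have hk1 : k < lines.length := by
    have := List.length_zip (l₁ := lines) (l₂ := lines.tail)
    omega
  have hkt : k < lines.tail.length := by
    have := List.length_zip (l₁ := lines) (l₂ := lines.tail)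
    omega
  have hk2 : k + 1 < lines.length := by
    simp [List.length_tail] at hkt
    omega
  have hz : PySem.List.pyGetD (lines.zip lines.tail) (k : Int) ("", "") = (lines[k], lines[k + 1]) := by
    rw [PySem.List.pyGetD_natCast]
    simp [List.getD, List.getElem?_eq_getElem hk, List.getElem_zip, List.getElem_tail]
  have hg1 : PySem.List.pyGetD lines (k : Int) "" = lines[k] := by
    rw [PySem.List.pyGetD_natCast]
    simp [List.getD, List.getElem?_eq_getElem hk1]
  have hg2 : PySem.List.pyGetD lines ((k : Int) + 1) "" = lines[k + 1] := by
    rw [show ((k : Int) + 1) = ((k + 1 : Nat) : Int) by push_cast; ring, PySem.List.pyGetD_natCast]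
    simp [List.getD, List.getElem?_eq_getElem hk2]
  simp only [Function.comp_apply, hz, hg1, hg2, pvCond]

theorem prefix_map (L : List String) (j : Nat) (hj : j ≤ L.length) :
    (PySem.List.pyRange 0 (j : Int) 1).map (fun i => PySem.List.pyGetD L i "") = L.take j := by
  induction j with
  | zero => simp [PySem.List.pyRange]
  | succ j ih =>
    have h0 : (0 : Int) ≤ (j : Int) := by positivity
    rw [show ((j + 1 : Nat) : Int) = (j : Int) + 1 by omega,
      PySem.List.pyRange_one_succ_right h0]
    have hjl : j < L.length := by omega
    rw [List.map_append, ih (by omega), List.take_add_one]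
    simp [PySem.List.pyGetD_natCast, List.getD, List.getElem?_eq_getElem hjl]

theorem pipe_of_startswith (s : String) (h : PySem.Str.startswith s "|" = true) :
    PySem.Str.isIn "|" s = true := by
  rw [PySem.Str.isIn_iff_infix]
  have h' : PySem.Chars.startswith s.toList "|".toList = true := by simpa using h
  exact ((PySem.Chars.startswith_iff _ _).mp h').isInfix

-- B's indexed filterMap over the tail equals A's running-counter fold
theorem rows_eq (T : List String) : ∀ (d m : Nat) (X : List String), T.length = m + d →
    ((T.drop m).foldl
      (fun (st : List String × Int) v =>
        let line := PySem.Str.strip v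
        if line = "" then st
        else if PySem.Str.startswith line "|" then
          (st.1 ++ ["| " ++ PySem.Int.toStr st.2 ++ " " ++ line], st.2 + 1)
        else if PySem.Str.isIn "|" line then
          (st.1 ++ ["| " ++ PySem.Int.toStr st.2 ++ " | " ++ line], st.2 + 1)
        else (st.1 ++ [v], st.2))
      (X, 1 + (((T.map PySem.Str.strip).take m).countP (fun t => PySem.Str.isIn "|" t) : Nat))).1
    = X ++ (PySem.List.pyRange (m : Int) ((T.length : Int)) 1).filterMap
        (bRow T (T.map PySem.Str.strip)) := by
  intro d
  induction d with
  | zero =>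
    intro m X h
    rw [List.drop_of_length_le (by omega), List.foldl_nil]
    have hr : PySem.List.pyRange (m : Int) ((T.length : Int)) 1 = [] := by
      simp [PySem.List.pyRange]
      omega
    rw [hr, List.filterMap_nil, List.append_nil]
  | succ d ih =>
    intro m X h
    have hm : m < T.length := by omega
    have hmS : m < (T.map PySem.Str.strip).length := by simpa using hm
    have hlt : ((m : Nat) : Int) < ((T.length : Int)) := by exact_mod_cast hm
    have hs : PySem.List.pyGetD (T.map PySem.Str.strip) (m : Int) "" = PySem.Str.strip T[m] := by
      rw [PySem.List.pyGetD_natCast]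
      simp [List.getD, List.getElem?_eq_getElem hmS]
    have hgT : PySem.List.pyGetD T (m : Int) "" = T[m] := by
      rw [PySem.List.pyGetD_natCast]
      simp [List.getD, List.getElem?_eq_getElem hm]
    have htake : (T.map PySem.Str.strip).take (m + 1)
        = (T.map PySem.Str.strip).take m ++ [PySem.Str.strip T[m]] := by
      rw [List.take_add_one]
      simp [List.getElem?_eq_getElem hmS]
    have hcast : ((m : Nat) : Int) + 1 = ((m + 1 : Nat) : Int) := by push_cast; ring
    rw [List.drop_eq_getElem_cons hm, PySem.List.pyRange_one_cons hlt,
      List.foldl_cons, List.filterMap_cons]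
    simp only [bRow, hs, hgT, PySem.List.slice_to_natCast]
    by_cases h1 : PySem.Str.strip T[m] = ""
    · rw [if_pos h1, if_pos h1]
      have hcnt : (((T.map PySem.Str.strip).take (m + 1)).countP (fun t => PySem.Str.isIn "|" t))
          = (((T.map PySem.Str.strip).take m).countP (fun t => PySem.Str.isIn "|" t)) := by
        rw [htake, h1, List.countP_append]
        simp only [List.countP_cons, List.countP_nil]
        rw [if_neg (by decide)]
        omega
      rw [hcast, ← hcnt]
      exact ih (m + 1) X (by omega)
    · rw [if_neg h1, if_neg h1]
      by_cases h2 : PySem.Str.startswith (PySem.Str.strip T[m]) "|" = true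
      · rw [if_pos h2, if_pos h2]
        have hcnt : (((T.map PySem.Str.strip).take (m + 1)).countP (fun t => PySem.Str.isIn "|" t))
            = (((T.map PySem.Str.strip).take m).countP (fun t => PySem.Str.isIn "|" t)) + 1 := by
          rw [htake, List.countP_append]
          simp only [List.countP_cons, List.countP_nil]
          rw [if_pos (pipe_of_startswith _ h2)]
        have hk : (1 + ((((T.map PySem.Str.strip).take m).countP (fun t => PySem.Str.isIn "|" t) : Nat) : Int)) + 1
            = 1 + ((((T.map PySem.Str.strip).take (m + 1)).countP (fun t => PySem.Str.isIn "|" t) : Nat) : Int) := by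
          rw [hcnt]; push_cast; ring
        rw [hcast, hk, ih (m + 1) _ (by omega), List.append_assoc]
        rfl
      · rw [if_neg h2, if_neg h2]
        by_cases h3 : PySem.Str.isIn "|" (PySem.Str.strip T[m]) = true
        · rw [if_pos h3, if_pos h3]
          have hcnt : (((T.map PySem.Str.strip).take (m + 1)).countP (fun t => PySem.Str.isIn "|" t))
              = (((T.map PySem.Str.strip).take m).countP (fun t => PySem.Str.isIn "|" t)) + 1 := by
            rw [htake, List.countP_append]
            simp only [List.countP_cons, List.countP_nil]
            rw [if_pos h3]
          have hk : (1 + ((((T.map PySem.Str.strip).take m).countP (fun t => PySem.Str.isIn "|" t) : Nat) : Int)) + 1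
              = 1 + ((((T.map PySem.Str.strip).take (m + 1)).countP (fun t => PySem.Str.isIn "|" t) : Nat) : Int) := by
            rw [hcnt]; push_cast; ring
          rw [hcast, hk, ih (m + 1) _ (by omega), List.append_assoc]
          rfl
        · rw [if_neg h3, if_neg h3]
          have hcnt : (((T.map PySem.Str.strip).take (m + 1)).countP (fun t => PySem.Str.isIn "|" t))
              = (((T.map PySem.Str.strip).take m).countP (fun t => PySem.Str.isIn "|" t)) := by
            rw [htake, List.countP_append]
            simp only [List.countP_cons, List.countP_nil]
            rw [if_neg h3]
            omega
          rw [hcast, ← hcnt, ih (m + 1) _ (by omega), List.append_assoc]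
          rfl

-- rows_eq at the start of the tail: counter 1, whole range
theorem rows_eq0 (T : List String) (X : List String) :
    (T.foldl
      (fun (st : List String × Int) v =>
        let line := PySem.Str.strip v
        if line = "" then st
        else if PySem.Str.startswith line "|" then
          (st.1 ++ ["| " ++ PySem.Int.toStr st.2 ++ " " ++ line], st.2 + 1)
        else if PySem.Str.isIn "|" line then
          (st.1 ++ ["| " ++ PySem.Int.toStr st.2 ++ " | " ++ line], st.2 + 1)
        else (st.1 ++ [v], st.2))
      (X, 1)).1
    = X ++ (PySem.List.pyRange 0 ((T.length : Int)) 1).filterMap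
        (bRow T (T.map PySem.Str.strip)) := by
  have h := rows_eq T T.length 0 X (by omega)
  simpa using h

-- ===== VERDICT (by name: the statement is the Claim_ definition above) =====
set_option maxHeartbeats 1000000 in
theorem add_question_numbers_spec : Claim_equal_add_question_numbers := by
  intro s _
  unfold Spec_add_question_numbers
  simp only [add_question_numbers, add_question_numbers_alt]
  by_cases hnil : (PySem.Str.split? (PySem.Str.strip s) "\n").getD [] = []
  · rw [hnil]
    rfl
  · rw [if_neg hnil]
    set L := (PySem.Str.split? (PySem.Str.strip s) "\n").getD [] with hLdef
    have hlen1 : 1 ≤ L.length := List.length_pos_iff.mpr hnil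
    have hz : (L.zip L.tail).length = L.length - 1 := by
      simp [List.length_zip]
    have hcastz : (PySem.List.len L - 1 : Int) = ((L.zip L.tail).length : Int) := by
      rw [PySem.List.len_eq, hz]
      omega
    have hfind : aFindA L (PySem.List.pyRange 0 (PySem.List.len L - 1) 1)
        = ((bHits L).head?).getD (-1) := by
      rw [aFindA_eq_find, ← List.head?_filter, hcastz, ← bHits_eq]
    rw [hfind]
    cases hb : bHits L with
    | nil =>
      rw [if_pos (show (([] : List Int).head?.getD (-1)) = -1 from rfl)]
    | cons hd rest =>
      rw [List.head?_cons, Option.getD_some]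
      have hmem : hd ∈ bHits L := by rw [hb]; exact List.mem_cons_self
      rw [bHits_eq] at hmem
      have hmem' := List.mem_of_mem_filter hmem
      rw [PySem.List.mem_pyRange_one] at hmem'
      obtain ⟨h0, hlt⟩ := hmem'
      obtain ⟨j, rfl⟩ : ∃ k : Nat, hd = (k : Int) := ⟨hd.toNat, (Int.toNat_of_nonneg h0).symm⟩
      have hj1 : j + 1 < L.length := by
        have : j < (L.zip L.tail).length := by exact_mod_cast hlt
        omega
      rw [if_neg (show ¬((j : Int) = -1) by omega)]
      simp only [List.append_assoc]
      -- prefix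
      rw [PySem.List.foldl_append_singleton_eq_map, List.nil_append, prefix_map L j (by omega),
        PySem.List.slice_to_natCast]
      -- data fold: range-fold to value-fold over the dropped tail
      rw [show ((j : Int) + 2) = ((j + 2 : Nat) : Int) by push_cast; ring]
      rw [PySem.List.foldl_pyRange_pyGetD L ""
        (fun (st : List String × Int) v =>
          let line := PySem.Str.strip v
          if line = "" then st
          else if PySem.Str.startswith line "|" then
            (st.1 ++ ["| " ++ PySem.Int.toStr st.2 ++ " " ++ line], st.2 + 1)
          else if PySem.Str.isIn "|" line then
            (st.1 ++ ["| " ++ PySem.Int.toStr st.2 ++ " | " ++ line], st.2 + 1)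
          else (st.1 ++ [v], st.2)) _ (show (0:Int) ≤ ((j + 2 : Nat) : Int) by exact_mod_cast Nat.zero_le _)]
      rw [Int.toNat_natCast, rows_eq0, PySem.List.slice_from_natCast, PySem.List.len_eq]
      simp [List.append_assoc]
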